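-- pv_equiv track=rewrite | github.com/csh3l3-20172018-ade/tebak-jenis-kelamin-berdasarkan-nama-ariijbnaufal | MALIN_Tugas1_AriijBangkitNaufal_1301154666.py | perempuan
-- ===== SOURCE A (Python) =====
-- def perempuan(nama):
--     poin = 0
--     for i in range(len(nama)):
--         if nama[i] == 'i':
--             poin = poin + 1
--         elif nama[i] == 'I':
--             poin = poin + 1
--         elif nama[i] == 'a':
--             poin = poin + 1
--         elif nama[i] == 'A':
--             poin = poin + 1
--         elif nama[i] == 'u':
--             poin = poin + 1
--         elif nama[i] == 'U':
--             poin = poin + 1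
--         elif nama[i] == 'e':
--             poin = poin + 1
--         elif nama[i] == 'E':
--             poin = poin + 1
--         elif nama[i] == 't':
--             poin = poin + 1
--         elif nama[i] == 'T':
--             poin = poin + 1
--         elif nama[i] == 'l':
--             poin = poin + 1
--         elif nama[i] == 'L':
--             poin = poin + 1
--         elif nama[i] == ' ':
--             break
--     return poin
-- ===== SOURCE B (Python) =====
-- LETTERS = 'iIaAuUeEtTlL'
--
-- def perempuan(nama):
--     prefix = nama.split(' ', 1)[0]
--     return sum(prefix.count(ch) for ch in LETTERS)
-- ===== Notes on version B (the rewrite author's own statement) =====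
-- stated objective: simpler
-- what changed: Replaces A's single index loop with a 13-branch if/elif ladder and a break by staged per-letter counting: truncate to the prefix before the first space, then run one str.count pass per target letter and sum the twelve counts.
import Mathlib
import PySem

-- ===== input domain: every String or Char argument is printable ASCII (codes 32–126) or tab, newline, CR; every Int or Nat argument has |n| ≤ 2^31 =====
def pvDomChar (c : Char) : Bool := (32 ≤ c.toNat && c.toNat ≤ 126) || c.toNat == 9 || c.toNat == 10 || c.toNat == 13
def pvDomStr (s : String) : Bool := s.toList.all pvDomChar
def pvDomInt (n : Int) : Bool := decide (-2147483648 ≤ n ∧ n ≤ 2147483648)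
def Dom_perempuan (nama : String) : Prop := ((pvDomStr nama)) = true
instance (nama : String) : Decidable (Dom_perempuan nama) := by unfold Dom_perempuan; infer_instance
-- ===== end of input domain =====

-- B replaces A's break-controlled single scan by staged per-letter counting:
-- truncate to the prefix before the first space, then one count pass per letter, summed.

-- ===== PORT A =====
-- A's for-loop over indices with break, transliterated as structural recursion over the
-- character list carrying the accumulator 'poin'; the elif ladder is kept in order.
def perempuanLoop : List Char → Int → Int
  | [], poin => poin
  | c :: rest, poin =>
    if c = 'i' then perempuanLoop rest (poin + 1)
    else if c = 'I' then perempuanLoop rest (poin + 1)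
    else if c = 'a' then perempuanLoop rest (poin + 1)
    else if c = 'A' then perempuanLoop rest (poin + 1)
    else if c = 'u' then perempuanLoop rest (poin + 1)
    else if c = 'U' then perempuanLoop rest (poin + 1)
    else if c = 'e' then perempuanLoop rest (poin + 1)
    else if c = 'E' then perempuanLoop rest (poin + 1)
    else if c = 't' then perempuanLoop rest (poin + 1)
    else if c = 'T' then perempuanLoop rest (poin + 1)
    else if c = 'l' then perempuanLoop rest (poin + 1)
    else if c = 'L' then perempuanLoop rest (poin + 1)
    else if c = ' ' then poin  -- break
    else perempuanLoop rest poin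

def perempuan (nama : String) : Int := perempuanLoop nama.toList 0

-- ===== PORT B =====
def pvLetters : List Char := ['i','I','a','A','u','U','e','E','t','T','l','L']

-- split(' ', 1)[0] is exactly the characters before the first space: takeWhile (· ≠ ' ');
-- then sum(prefix.count(ch) for ch in LETTERS): one List.count per letter, summed.
def perempuan_alt (nama : String) : Int :=
  ((pvLetters.map (fun ch => (nama.toList.takeWhile (fun c => c ≠ ' ')).count ch)).sum : Int)

-- ===== PRECONDITION & SPEC =====
def Spec_perempuan (nama : String) (out : Int) : Prop := out = perempuan_alt nama
instance (nama : String) (out : Int) : Decidable (Spec_perempuan nama out) := by unfold Spec_perempuan; infer_instance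

-- ===== CLAIM (what is proved, stated in full; the proofs are below) =====
def Claim_equal_perempuan : Prop := ∀ (nama : String), Dom_perempuan nama → Spec_perempuan nama (perempuan nama)

-- ===== LEMMAS AND PROOFS =====
theorem perempuanLoop_eq (cs : List Char) (p : Int) :
    perempuanLoop cs p = p + ((cs.takeWhile (fun c => c ≠ ' ')).countP (fun c => c ∈ pvLetters) : Int) := by
  induction cs generalizing p with
  | nil => simp [perempuanLoop]
  | cons c rest ih =>
    by_cases hsp : c = ' '
    · subst hsp
      simp [perempuanLoop, List.takeWhile]
    · have hmem : ((c ∈ pvLetters) : Prop) ∨ ¬ ((c ∈ pvLetters) : Prop) := em _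
      simp only [perempuanLoop]
      rcases hmem with h | h
      · fin_cases h <;> simp [ih, pvLetters] <;> omega
      · have h1 : c ≠ 'i' := by rintro rfl; simp [pvLetters] at h
        have h2 : c ≠ 'I' := by rintro rfl; simp [pvLetters] at h
        have h3 : c ≠ 'a' := by rintro rfl; simp [pvLetters] at h
        have h4 : c ≠ 'A' := by rintro rfl; simp [pvLetters] at h
        have h5 : c ≠ 'u' := by rintro rfl; simp [pvLetters] at h
        have h6 : c ≠ 'U' := by rintro rfl; simp [pvLetters] at h
        have h7 : c ≠ 'e' := by rintro rfl; simp [pvLetters] at h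
        have h8 : c ≠ 'E' := by rintro rfl; simp [pvLetters] at h
        have h9 : c ≠ 't' := by rintro rfl; simp [pvLetters] at h
        have h10 : c ≠ 'T' := by rintro rfl; simp [pvLetters] at h
        have h11 : c ≠ 'l' := by rintro rfl; simp [pvLetters] at h
        have h12 : c ≠ 'L' := by rintro rfl; simp [pvLetters] at h
        simp [h1,h2,h3,h4,h5,h6,h7,h8,h9,h10,h11,h12,hsp,ih,h]

-- the sum of per-letter counts over a duplicate-free letter list equals one membership count
theorem sum_map_count_cons (c : Char) (rest l : List Char) :
    (l.map (fun ch => (c :: rest).count ch)).sum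
      = (l.map (fun ch => rest.count ch)).sum + l.count c := by
  induction l with
  | nil => simp
  | cons d l ih =>
    have hc : (c :: rest).count d = rest.count d + if d = c then 1 else 0 := by
      simp only [List.count_cons, beq_iff_eq]
      by_cases h : d = c
      · simp [h]
      · have h2 : ¬ c = d := fun hh => h hh.symm
        simp [h, h2]
    have hd : (d :: l).count c = l.count c + if c = d then 1 else 0 := by
      simp only [List.count_cons, beq_iff_eq]
      by_cases h : c = d
      · simp [h]
      · have h2 : ¬ d = c := fun hh => h hh.symm
        simp [h, h2]
    simp only [List.map_cons, List.sum_cons, ih, hc, hd]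
    by_cases h : d = c
    · subst h; simp; omega
    · have h' : ¬ c = d := fun hh => h hh.symm
      simp [h, h']; omega

theorem sum_counts_eq_countP (cs : List Char) :
    (pvLetters.map (fun ch => cs.count ch)).sum = cs.countP (fun c => c ∈ pvLetters) := by
  induction cs with
  | nil => simp
  | cons c rest ih =>
    have hnd : pvLetters.Nodup := by decide
    have hcount : pvLetters.count c = if c ∈ pvLetters then 1 else 0 := by
      split_ifs with h
      · exact List.count_eq_one_of_mem hnd h
      · exact List.count_eq_zero.mpr h
    rw [sum_map_count_cons, ih, hcount, List.countP_cons]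
    by_cases h : ((c ∈ pvLetters) : Prop) <;> simp [h]

-- ===== VERDICT (by name: the statement is the Claim_ definition above) =====
theorem perempuan_spec : Claim_equal_perempuan := by
  intro nama _
  unfold Spec_perempuan perempuan perempuan_alt
  rw [perempuanLoop_eq, ← sum_counts_eq_countP]
  simp
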